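-- pv_equiv track=rewrite | github.com/samikoz/pyfun | fun_intarray.py | max_non_overlapping_sum
-- ===== SOURCE A (Python) =====
-- import itertools
--
-- def max_non_overlapping_sum(array, k):
--     """for an integer array of length N, selects some non-overlapping subarrays
--     so that none two are adjacent, have length at most k and maximise the sum. dynamic programming."""
--     array = array.copy()
--     dynamic_storage = list(itertools.repeat(None, len(array)))
--
--     k_plus_one_zeros = list(itertools.repeat(0, k+1))
--     array.extend(k_plus_one_zeros)
--     dynamic_storage.extend(k_plus_one_zeros)
--
--     def compute_for_subarray_above(i):
--         """max_non_overlapping_sum for array[i:]. recursive.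
--         at index i either drop array[i] and compute for i+1 or take array[i] and compute i+2 ...
--         or take array[i:i+k] and compute i+k+1"""
--         if dynamic_storage[i] is not None:
--             return dynamic_storage[i]
--
--         dynamic_storage[i] = max(sum(array[i:n]) + compute_for_subarray_above(n+1) for n in range(i, i+k+1))
--         return dynamic_storage[i]
--
--     return compute_for_subarray_above(0)
-- ===== SOURCE B (Python) =====
-- def max_non_overlapping_sum(array, k):
--     """Bottom-up DP with an incremental running segment sum: f[i] is the best
--     total for array[i:]; the inner loop extends the taken segment one element
--     at a time instead of re-summing slices."""
--     n = len(array)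
--     f = [0] * (n + 2)
--     for i in range(n - 1, -1, -1):
--         s = 0
--         best = f[i + 1]
--         for t in range(1, k + 1):
--             j = i + t
--             if j > n:
--                 break
--             s += array[j - 1]
--             if s + f[j + 1] > best:
--                 best = s + f[j + 1]
--         f[i] = best
--     return f[0]
-- ===== Notes on version B (the rewrite author's own statement) =====
-- stated objective: faster
-- what changed: Replaces the memoised top-down recursion that re-sums every slice array[i:n] inside the max() generator with an iterative bottom-up DP whose inner loop extends the taken segment one element at a time with a running sum, removing both the recursion and the O(k) re-summation per candidate.
import Mathlib
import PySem

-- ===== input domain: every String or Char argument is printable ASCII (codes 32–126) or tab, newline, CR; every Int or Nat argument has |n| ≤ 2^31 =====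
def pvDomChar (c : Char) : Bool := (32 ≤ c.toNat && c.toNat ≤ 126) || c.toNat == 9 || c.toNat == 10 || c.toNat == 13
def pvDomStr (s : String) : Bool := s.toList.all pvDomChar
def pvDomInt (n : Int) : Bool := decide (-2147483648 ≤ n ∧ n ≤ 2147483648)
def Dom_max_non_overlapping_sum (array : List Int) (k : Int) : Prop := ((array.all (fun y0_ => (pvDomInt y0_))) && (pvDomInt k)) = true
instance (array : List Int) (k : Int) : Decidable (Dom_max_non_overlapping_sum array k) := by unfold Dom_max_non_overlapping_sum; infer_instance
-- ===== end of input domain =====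

-- B replaces A's memoised top-down recursion (which re-sums every slice array[i:n]) by an
-- iterative bottom-up DP with an incremental running segment sum: objective = faster.

-- ===== PORT A =====
-- one step of the generator expression inside max(...): candidate for taking array[i:n]
def pvAstep (arrExt : List Int) (rec : List (Option Int) → Int → Int × List (Option Int)) (i : Int)
    (acc : Option Int × List (Option Int)) (n : Int) : Option Int × List (Option Int) :=
  let r := rec acc.2 (n + 1)
  let c := (PySem.List.slice arrExt (some i) (some n)).sum + r.1
  (some (match acc.1 with | none => c | some m => max m c), r.2)

-- compute_for_subarray_above with the memo list `dynamic_storage` threaded through explicitly;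
-- fuel bounds the recursion depth (array.length+padding+1 always suffices; fuel 0 is unreachable
-- on inputs satisfying Pre_).
def pvAcompute (arrExt : List Int) (k : Int) (fuel : Nat) (st : List (Option Int)) (i : Int) :
    Int × List (Option Int) :=
  match fuel with
  | 0 => (0, st)
  | fuel' + 1 =>
    match (PySem.List.pyGet? st i).getD none with
    | some v => (v, st)          -- dynamic_storage[i] is not None
    | none =>
      -- max(sum(array[i:n]) + compute_for_subarray_above(n+1) for n in range(i, i+k+1))
      let res := (PySem.List.pyRange i (i + k + 1) 1).foldl
        (pvAstep arrExt (pvAcompute arrExt k fuel') i) (none, st)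
      match res.1 with
      | none => (0, res.2)       -- empty generator: Python raises ValueError here (k < 0, outside Pre_)
      | some v => (v, res.2.set i.toNat (some v))
termination_by fuel

def max_non_overlapping_sum (array : List Int) (k : Int) : Int :=
  let pad : List Int := List.replicate (k + 1).toNat 0
  let arrExt := array ++ pad
  let st0 : List (Option Int) := List.replicate array.length none ++ pad.map some
  (pvAcompute arrExt k (arrExt.length + 1) st0 0).1

-- ===== PORT B =====
-- the inner `for t in range(1, k+1): … break` loop of Source B, with running sum s and best-so-far
def pvBinner (array f : List Int) (n i : Int) : List Int → Int → Int → Int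
  | [], _, best => best
  | t :: ts, s, best =>
    if i + t > n then best       -- break
    else
      let s' := s + (PySem.List.pyGet? array (i + t - 1)).getD 0
      let c := s' + (PySem.List.pyGet? f (i + t + 1)).getD 0
      pvBinner array f n i ts s' (if c > best then c else best)

def max_non_overlapping_sum_alt (array : List Int) (k : Int) : Int :=
  let n : Int := array.length
  let f0 : List Int := List.replicate (array.length + 2) 0
  let f := (PySem.List.pyRange (n - 1) (-1) (-1)).foldl
    (fun f i =>
      let best := pvBinner array f n i (PySem.List.pyRange 1 (k + 1) 1) 0
        ((PySem.List.pyGet? f (i + 1)).getD 0)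
      f.set i.toNat best) f0
  (PySem.List.pyGet? f 0).getD 0

-- ===== PRECONDITION & SPEC =====
-- Pre_ excludes exactly the inputs where A raises: k < 0 (max() on an empty generator raises
-- ValueError, or IndexError for the empty array).
def Pre_max_non_overlapping_sum (array : List Int) (k : Int) : Prop := 0 ≤ k
instance (array : List Int) (k : Int) : Decidable (Pre_max_non_overlapping_sum array k) := by
  unfold Pre_max_non_overlapping_sum; infer_instance

def pvWitness_max_non_overlapping_sum : List Int × Int := ([1, 2, 3], 2)

def Spec_max_non_overlapping_sum (array : List Int) (k : Int) (out : Int) : Prop := out = max_non_overlapping_sum_alt array k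
instance (array : List Int) (k : Int) (out : Int) : Decidable (Spec_max_non_overlapping_sum array k out) := by unfold Spec_max_non_overlapping_sum; infer_instance

-- ===== CLAIM (what is proved, stated in full; the proofs are below) =====
def Claim_equal_max_non_overlapping_sum : Prop := ∀ (array : List Int) (k : Int), Dom_max_non_overlapping_sum array k → Pre_max_non_overlapping_sum array k → Spec_max_non_overlapping_sum array k (max_non_overlapping_sum array k)

-- ===== LEMMAS AND PROOFS =====

-- the mathematical value both ports compute: best admissible sum for array[i:]
def Gspec (arr : List Int) (K : Nat) (i : Nat) : Int :=
  if _h : i < arr.length then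
    (List.range K).foldl
      (fun m t => max m (((arr.drop i).take (t + 1)).sum + Gspec arr K (i + t + 2)))
      (Gspec arr K (i + 1))
  else 0
termination_by arr.length - i
decreasing_by all_goals omega

-- candidate value: take array[i:i+t], then the best for array[i+t+1:]
def pvCand (arr : List Int) (K i t : Nat) : Int :=
  ((arr.drop i).take t).sum + Gspec arr K (i + t + 1)

-- best over candidates t = 0, 1, …, t (Python max-fold order)
def pvM (arr : List Int) (K i t : Nat) : Int :=
  (List.range' 1 t).foldl (fun m u => max m (pvCand arr K i u)) (pvCand arr K i 0)

theorem gspec_of_ge (arr : List Int) (K i : Nat) (h : arr.length ≤ i) : Gspec arr K i = 0 := by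
  rw [Gspec]; simp [Nat.not_lt.mpr h]

theorem gspec_of_lt (arr : List Int) (K i : Nat) (h : i < arr.length) :
    Gspec arr K i = (List.range K).foldl (fun m t => max m (pvCand arr K i (t + 1))) (pvCand arr K i 0) := by
  rw [Gspec, dif_pos h]
  have h0 : pvCand arr K i 0 = Gspec arr K (i + 1) := by simp [pvCand]
  rw [h0]
  congr 1

theorem sum_take_append_replicate (xs : List Int) (m t : Nat) :
    (((xs ++ List.replicate m 0).take t)).sum = ((xs.take t)).sum := by
  simp [List.take_append, List.take_replicate]

theorem sliceSum (arr : List Int) (m i t : Nat) (h : i ≤ arr.length) :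
    (PySem.List.slice (arr ++ List.replicate m (0:Int)) (some (i:Int)) (some ((i:Int)+(t:Int)))).sum
      = ((arr.drop i).take t).sum := by
  rw [PySem.List.slice_natCast_add, List.drop_append_of_le_length h, sum_take_append_replicate]

theorem segSum_succ (arr : List Int) (i t : Nat) (h : i + t < arr.length) :
    ((arr.drop i).take (t + 1)).sum = ((arr.drop i).take t).sum + arr.getD (i + t) 0 := by
  rw [List.take_add_one]
  simp [List.getElem?_drop, List.getD_eq_getElem?_getD, List.getElem?_eq_getElem h]

-- ===== A-side =====

def AInv (arr : List Int) (k : Int) (st : List (Option Int)) : Prop :=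
  st.length = arr.length + (k.toNat + 1) ∧
  (∀ j : Nat, arr.length ≤ j → j < st.length → st[j]? = some (some 0)) ∧
  (∀ (j : Nat) (v : Int), st[j]? = some (some v) → v = Gspec arr k.toNat j)

theorem AInv_set (arr : List Int) (k : Int) (st : List (Option Int)) (i : Nat) (v : Int)
    (h : AInv arr k st) (hi : i < arr.length) (hv : v = Gspec arr k.toNat i) :
    AInv arr k (st.set i (some v)) := by
  obtain ⟨h1, h2, h3⟩ := h
  refine ⟨by simp [h1], ?_, ?_⟩
  · intro j hj hjl
    rw [List.getElem?_set_ne (by omega)]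
    exact h2 j hj (by simpa using hjl)
  · intro j w hw
    by_cases hji : j = i
    · subst hji
      have hjl : j < st.length := by omega
      rw [List.getElem?_set_self] at hw
      · cases hw; exact hv
      · exact hjl
    · rw [List.getElem?_set_ne (by omega)] at hw
      exact h3 j w hw

theorem A_fold (arr : List Int) (k : Int) (i : Nat) (hiN : i < arr.length)
    (rec : List (Option Int) → Int → Int × List (Option Int))
    (hrec : ∀ (st' : List (Option Int)) (t : Nat), AInv arr k st' → t ≤ k.toNat →
       (rec st' ((i:Int)+(t:Int)+1)).1 = Gspec arr k.toNat (i+t+1) ∧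
       AInv arr k (rec st' ((i:Int)+(t:Int)+1)).2) :
    ∀ (L : List Nat), (∀ t ∈ L, t ≤ k.toNat) → ∀ (m : Int) (st' : List (Option Int)), AInv arr k st' →
      ((L.foldl (fun acc (t : Nat) => pvAstep (arr ++ List.replicate (k+1).toNat 0) rec (i:Int) acc ((i:Int)+(t:Int))) (some m, st')).1
        = some (L.foldl (fun m t => max m (pvCand arr k.toNat i t)) m)) ∧
      AInv arr k (L.foldl (fun acc (t : Nat) => pvAstep (arr ++ List.replicate (k+1).toNat 0) rec (i:Int) acc ((i:Int)+(t:Int))) (some m, st')).2 := by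
  intro L
  induction L with
  | nil => intro _ m st' h; exact ⟨rfl, h⟩
  | cons t ts ihL =>
    intro hL m st' h
    obtain ⟨hv, hinv⟩ := hrec st' t h (hL t (by simp))
    have hstep : pvAstep (arr ++ List.replicate (k+1).toNat 0) rec (i:Int) (some m, st') ((i:Int)+(t:Int))
        = (some (max m (pvCand arr k.toNat i t)), (rec st' ((i:Int)+(t:Int)+1)).2) := by
      unfold pvAstep
      simp only [hv, sliceSum arr _ i t (le_of_lt hiN)]
      rfl
    rw [List.foldl_cons, hstep, List.foldl_cons]
    exact ihL (fun u hu => hL u (by simp [hu])) _ _ hinv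

theorem A_main (arr : List Int) (k : Int) (hk : 0 ≤ k) :
    ∀ (fuel : Nat) (st : List (Option Int)) (i : Nat),
      AInv arr k st → i < st.length → arr.length + 1 ≤ fuel + i →
      (pvAcompute (arr ++ List.replicate (k+1).toNat 0) k fuel st (i:Int)).1 = Gspec arr k.toNat i ∧
      AInv arr k (pvAcompute (arr ++ List.replicate (k+1).toNat 0) k fuel st (i:Int)).2 := by
  intro fuel
  induction fuel with
  | zero =>
    intro st i hInv hi hfuel
    rw [pvAcompute]
    exact ⟨(gspec_of_ge arr k.toNat i (by omega)).symm, hInv⟩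
  | succ fuel ih =>
    intro st i hInv hi hfuel
    obtain ⟨hlen, hpad, hmem⟩ := hInv
    rw [pvAcompute]
    simp only [PySem.List.pyGet?_natCast, List.getElem?_eq_getElem hi, Option.getD_some]
    cases hsti : st[i] with
    | some v =>
      exact ⟨hmem i v (by rw [List.getElem?_eq_getElem hi, hsti]), ⟨hlen, hpad, hmem⟩⟩
    | none =>
      have hiN : i < arr.length := by
        by_contra hcon
        rw [Nat.not_lt] at hcon
        have := hpad i hcon hi
        rw [List.getElem?_eq_getElem hi, hsti] at this
        simp at this
      have hrange : PySem.List.pyRange (i:Int) ((i:Int) + k + 1) 1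
          = (List.range (k.toNat + 1)).map (fun t : Nat => (i:Int) + (t:Int)) := by
        rw [PySem.List.pyRange_one, show ((i:Int)+k+1-(i:Int)) = k+1 from by ring,
          show (k+1).toNat = k.toNat + 1 from by omega]
      have hrec : ∀ (st' : List (Option Int)) (t : Nat), AInv arr k st' → t ≤ k.toNat →
          (pvAcompute (arr ++ List.replicate (k+1).toNat 0) k fuel st' ((i:Int)+(t:Int)+1)).1 = Gspec arr k.toNat (i+t+1) ∧
          AInv arr k (pvAcompute (arr ++ List.replicate (k+1).toNat 0) k fuel st' ((i:Int)+(t:Int)+1)).2 := by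
        intro st' t hInv' ht
        have hc : ((i:Int)+(t:Int)+1) = (((i+t+1 : Nat)):Int) := by push_cast; ring
        rw [hc]
        have hl' := hInv'.1
        exact ih st' (i+t+1) hInv' (by omega) (by omega)
      rw [hrange, List.foldl_map, List.range_succ_eq_map, List.foldl_cons]
      have hstep0 : pvAstep (arr ++ List.replicate (k+1).toNat 0)
            (pvAcompute (arr ++ List.replicate (k+1).toNat 0) k fuel) (i:Int) (none, st) ((i:Int)+((0:Nat):Int))
          = (some (pvCand arr k.toNat i 0),
             (pvAcompute (arr ++ List.replicate (k+1).toNat 0) k fuel st ((i:Int)+((0:Nat):Int)+1)).2) := by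
        obtain ⟨h1, h2⟩ := hrec st 0 ⟨hlen, hpad, hmem⟩ (by omega)
        unfold pvAstep
        simp only [h1, sliceSum arr _ i 0 (le_of_lt hiN)]
        simp [pvCand]
      rw [hstep0]
      obtain ⟨_, hinv1⟩ := hrec st 0 ⟨hlen, hpad, hmem⟩ (by omega)
      have hLbound : ∀ t ∈ (List.range k.toNat).map Nat.succ, t ≤ k.toNat := by
        intro t ht
        simp only [List.mem_map, List.mem_range] at ht
        obtain ⟨u, hu, rfl⟩ := ht
        omega
      obtain ⟨hfst, hsnd⟩ := A_fold arr k i hiN _ hrec ((List.range k.toNat).map Nat.succ) hLbound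
        (pvCand arr k.toNat i 0) _ hinv1
      rw [hfst]
      constructor
      · rw [gspec_of_lt arr k.toNat i hiN, List.foldl_map]
      · simp only [Int.toNat_natCast]
        refine AInv_set arr k _ _ _ hsnd hiN ?_
        rw [gspec_of_lt arr k.toNat i hiN, List.foldl_map]

theorem A_eq (array : List Int) (k : Int) (hk : 0 ≤ k) :
    max_non_overlapping_sum array k = Gspec array k.toNat 0 := by
  have hInv0 : AInv array k
      (List.replicate array.length (none : Option Int) ++ (List.replicate (k+1).toNat (0:Int)).map some) := by
    refine ⟨by simp; omega, ?_, ?_⟩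
    · intro j hj hjl
      rw [List.getElem?_append_right (by simpa using hj)]
      simp only [List.length_replicate, List.getElem?_map, List.getElem?_replicate]
      rw [if_pos (by simp at hjl; omega)]
      rfl
    · intro j v hjv
      by_cases hjN : j < array.length
      · rw [List.getElem?_append_left (by simpa using hjN)] at hjv
        simp [hjN] at hjv
      · rw [List.getElem?_append_right (by simp; omega)] at hjv
        simp only [List.length_replicate, List.getElem?_map, List.getElem?_replicate] at hjv
        by_cases hlt : j - array.length < (k+1).toNat
        · rw [if_pos hlt] at hjv
          cases hjv
          exact (gspec_of_ge array k.toNat j (by omega)).symm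
        · rw [if_neg hlt] at hjv
          cases hjv
  have hm := A_main array k hk ((array ++ List.replicate (k+1).toNat 0).length + 1) _ 0 hInv0
    (by simp; omega) (by simp)
  unfold max_non_overlapping_sum
  simpa using hm.1

-- ===== B-side =====

def BInv (arr : List Int) (K : Nat) (i : Nat) (f : List Int) : Prop :=
  f.length = arr.length + 2 ∧ ∀ j : Nat, i ≤ j → f.getD j 0 = Gspec arr K j

theorem pvM_succ (arr : List Int) (K i t : Nat) :
    pvM arr K i (t + 1) = max (pvM arr K i t) (pvCand arr K i (1 + t)) := by
  unfold pvM
  rw [List.range'_1_concat, List.foldl_append]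
  rfl

theorem pvCand_le_pvM (arr : List Int) (K i : Nat) : ∀ t u, u ≤ t → pvCand arr K i u ≤ pvM arr K i t := by
  intro t
  induction t with
  | zero => intro u hu; interval_cases u; exact le_of_eq rfl
  | succ t ih =>
    intro u hu
    rw [pvM_succ]
    rcases Nat.lt_or_ge u (t + 1) with h | h
    · exact le_trans (ih u (by omega)) (le_max_left _ _)
    · have : u = 1 + t := by omega
      subst this
      exact le_max_right _ _

theorem pvCand_const (arr : List Int) (K i t : Nat) (hi : i ≤ arr.length) (h : arr.length ≤ i + t) :
    pvCand arr K i t = pvCand arr K i (arr.length - i) := by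
  unfold pvCand
  rw [gspec_of_ge arr K (i + t + 1) (by omega),
      gspec_of_ge arr K (i + (arr.length - i) + 1) (by omega),
      List.take_of_length_le (by simp; omega), List.take_of_length_le (by simp)]

theorem pvM_stable (arr : List Int) (K i : Nat) (hi : i < arr.length) :
    ∀ t, arr.length - i ≤ t → pvM arr K i t = pvM arr K i (arr.length - i) := by
  intro t
  induction t with
  | zero => intro h; rw [Nat.le_zero.mp h]
  | succ t ih =>
    intro h
    rcases Nat.lt_or_ge t (arr.length - i) with h2 | h2
    · have : arr.length - i = t + 1 := by omega
      rw [this]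
    · rw [pvM_succ, ih h2, pvCand_const arr K i (1 + t) (by omega) (by omega),
        max_eq_left (pvCand_le_pvM arr K i (arr.length - i) (arr.length - i) le_rfl)]

theorem if_gt_max (b c : Int) : (if c > b then c else b) = max b c := by
  rw [max_def]
  split_ifs <;> omega

theorem pvBinner_cons (array f : List Int) (n i t : Int) (ts : List Int) (s best : Int) :
    pvBinner array f n i (t :: ts) s best
      = if i + t > n then best
        else pvBinner array f n i ts (s + (PySem.List.pyGet? array (i + t - 1)).getD 0)
          (if (s + (PySem.List.pyGet? array (i + t - 1)).getD 0) + (PySem.List.pyGet? f (i + t + 1)).getD 0 > best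
           then (s + (PySem.List.pyGet? array (i + t - 1)).getD 0) + (PySem.List.pyGet? f (i + t + 1)).getD 0
           else best) := rfl

theorem B_inner (arr f : List Int) (k : Int) (i : Nat)
    (hiN : i < arr.length) (hf : BInv arr k.toNat (i + 1) f) :
    ∀ (len t0 : Nat), 1 ≤ t0 →
      pvBinner arr f (arr.length : Int) (i : Int)
        ((List.range' t0 len).map (fun t : Nat => (t : Int)))
        (((arr.drop i).take (t0 - 1)).sum) (pvM arr k.toNat i (t0 - 1))
      = pvM arr k.toNat i (t0 - 1 + len) := by
  intro len
  induction len with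
  | zero => intro t0 _; rfl
  | succ len ih =>
    intro t0 ht0
    rw [List.range'_succ, List.map_cons]
    rw [pvBinner_cons]
    by_cases hbr : ((i : Int) + (t0 : Int) > (arr.length : Int))
    · -- break: i + t0 > arr.length
      rw [if_pos hbr]
      have hge : arr.length - i ≤ t0 - 1 := by omega
      rw [pvM_stable arr k.toNat i hiN (t0 - 1) hge,
          pvM_stable arr k.toNat i hiN (t0 - 1 + (len + 1)) (by omega)]
    · -- i + t0 ≤ arr.length
      rw [if_neg hbr]
      have hle : i + t0 ≤ arr.length := by omega
      have hidx : ((i : Int) + (t0 : Int) - 1) = (((i + (t0 - 1) : Nat)) : Int) := by push_cast; omega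
      have hidx2 : ((i : Int) + (t0 : Int) + 1) = (((i + t0 + 1 : Nat)) : Int) := by push_cast; omega
      rw [hidx, hidx2, PySem.List.pyGet?_natCast, PySem.List.pyGet?_natCast]
      have harr : (arr[(i + (t0 - 1) : Nat)]?).getD 0 = arr.getD (i + (t0 - 1)) 0 := by
        rw [List.getD_eq_getElem?_getD]
      have hfv : (f[(i + t0 + 1 : Nat)]?).getD 0 = Gspec arr k.toNat (i + t0 + 1) := by
        rw [← List.getD_eq_getElem?_getD]
        exact hf.2 (i + t0 + 1) (by omega)
      rw [harr, hfv]
      have hs : ((arr.drop i).take (t0 - 1)).sum + arr.getD (i + (t0 - 1)) 0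
          = ((arr.drop i).take t0).sum := by
        have := segSum_succ arr i (t0 - 1) (by omega)
        rw [show t0 - 1 + 1 = t0 from by omega] at this
        omega
      rw [hs]
      have hc : ((arr.drop i).take t0).sum + Gspec arr k.toNat (i + t0 + 1) = pvCand arr k.toNat i t0 := rfl
      rw [hc, if_gt_max,
        show max (pvM arr k.toNat i (t0 - 1)) (pvCand arr k.toNat i t0)
           = pvM arr k.toNat i t0 from by
          rw [show t0 = (t0 - 1) + 1 from by omega, pvM_succ,
            show 1 + (t0 - 1) = t0 - 1 + 1 from by omega, Nat.add_sub_cancel]]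
      have := ih (t0 + 1) (by omega)
      rw [show t0 + 1 - 1 = t0 from by omega] at this
      rw [this, show t0 - 1 + (len + 1) = t0 + len from by omega]

theorem B_body (arr f : List Int) (k : Int) (i : Nat)
    (hiN : i < arr.length) (hf : BInv arr k.toNat (i + 1) f) :
    BInv arr k.toNat i
      (f.set i (pvBinner arr f (arr.length : Int) (i : Int) (PySem.List.pyRange 1 (k + 1) 1) 0
        ((PySem.List.pyGet? f ((i : Int) + 1)).getD 0))) := by
  have hrange : PySem.List.pyRange 1 (k + 1) 1
      = (List.range' 1 k.toNat).map (fun t : Nat => (t : Int)) := by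
    rw [PySem.List.pyRange_one, show ((k:Int) + 1 - 1) = k from by ring,
        List.range'_eq_map_range, List.map_map]
    congr 1
  have hbest0 : (PySem.List.pyGet? f ((i : Int) + 1)).getD 0 = pvM arr k.toNat i 0 := by
    rw [show ((i : Int) + 1) = (((i + 1 : Nat)) : Int) from by push_cast; ring,
        PySem.List.pyGet?_natCast, ← List.getD_eq_getElem?_getD]
    rw [hf.2 (i + 1) le_rfl]
    simp [pvM, pvCand]
  have hinner := B_inner arr f k i hiN hf k.toNat 1 le_rfl
  simp only [Nat.sub_self, List.take_zero, List.sum_nil, Nat.zero_add] at hinner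
  rw [hrange, hbest0]
  have hres : pvBinner arr f (arr.length : Int) (i : Int)
      ((List.range' 1 k.toNat).map (fun t : Nat => (t : Int))) 0 (pvM arr k.toNat i 0)
      = Gspec arr k.toNat i := by
    rw [hinner, gspec_of_lt arr k.toNat i hiN]
    unfold pvM
    rw [List.range'_eq_map_range, List.foldl_map]
    congr 1
    funext m t
    rw [Nat.add_comm 1 t]
  rw [hres]
  obtain ⟨hlen, hval⟩ := hf
  refine ⟨by simp [hlen], ?_⟩
  intro j hj
  by_cases hji : j = i
  · subst hji
    rw [List.getD_eq_getElem?_getD, List.getElem?_set_self, Option.getD_some]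
    omega
  · rw [List.getD_eq_getElem?_getD, List.getElem?_set_ne (by omega), ← List.getD_eq_getElem?_getD]
    exact hval j (by omega)

theorem B_outer (arr : List Int) (k : Int) (hk : 0 ≤ k) :
    ∀ (i : Nat) (f : List Int), i ≤ arr.length → BInv arr k.toNat i f →
      BInv arr k.toNat 0
        ((PySem.List.pyRange ((i : Int) - 1) (-1) (-1)).foldl
          (fun f i =>
            f.set i.toNat (pvBinner arr f (arr.length : Int) i (PySem.List.pyRange 1 (k + 1) 1) 0
              ((PySem.List.pyGet? f (i + 1)).getD 0))) f) := by
  intro i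
  induction i with
  | zero =>
    intro f _ hf
    rw [show ((0 : Nat) : Int) - 1 = -1 from by ring, PySem.List.pyRange_neg_one_eq_nil le_rfl]
    exact hf
  | succ i ih =>
    intro f hi hf
    rw [show (((i + 1 : Nat)) : Int) - 1 = (i : Nat) from by push_cast; ring,
        PySem.List.pyRange_neg_one_cons (by omega), List.foldl_cons]
    have hb := B_body arr f k i (by omega) (by exact hf)
    simp only [Int.toNat_natCast]
    exact ih _ (by omega) hb

theorem B_eq (array : List Int) (k : Int) (hk : 0 ≤ k) :
    max_non_overlapping_sum_alt array k = Gspec array k.toNat 0 := by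
  have hInv0 : BInv array k.toNat array.length (List.replicate (array.length + 2) (0 : Int)) := by
    refine ⟨by simp, ?_⟩
    intro j hj
    rw [gspec_of_ge array k.toNat j hj]
    rw [List.getD_eq_getElem?_getD, List.getElem?_replicate]
    split_ifs <;> rfl
  have hout := B_outer array k hk array.length _ le_rfl hInv0
  unfold max_non_overlapping_sum_alt
  simp only []
  obtain ⟨hlen, hval⟩ := hout
  have h0 : (PySem.List.pyGet? ((PySem.List.pyRange ((array.length : Int) - 1) (-1) (-1)).foldl
      (fun f i =>
        f.set i.toNat (pvBinner array f (array.length : Int) i (PySem.List.pyRange 1 (k + 1) 1) 0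
          ((PySem.List.pyGet? f (i + 1)).getD 0))) (List.replicate (array.length + 2) (0 : Int))) 0).getD 0
      = Gspec array k.toNat 0 := by
    rw [show (0 : Int) = ((0 : Nat) : Int) from rfl, PySem.List.pyGet?_natCast,
      ← List.getD_eq_getElem?_getD]
    exact hval 0 (Nat.zero_le 0)
  exact h0

-- ===== VERDICT (by name: the statement is the Claim_ definition above) =====
theorem max_non_overlapping_sum_spec : Claim_equal_max_non_overlapping_sum := by
  intro array k _ hk
  unfold Spec_max_non_overlapping_sum
  rw [A_eq array k hk, B_eq array k hk]
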